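-- pv_equiv track=rewrite | github.com/YxinMiracle/ESP | entity_recognition_module/src/ESPs.py | get_subseq_idx_list
-- ===== SOURCE A (Python) =====
-- def get_subseq_idx_list(windows, t, T):
--     index_list = []
--     for u in range(1, windows // 2 + 1):
--         if t - u >= 0:
--             index_list.append(t - u)
--         if t + u <= T - 1:
--             index_list.append(t + u)
--     index_list.append(t)
--     index_list.sort()
--     return index_list
-- ===== SOURCE B (Python) =====
-- def get_subseq_idx_list(windows, t, T):
--     w = windows // 2
--     lo = max(t - w, 0)
--     hi = min(t + w, T - 1)
--     return list(range(lo, t)) + [t] + list(range(t + 1, hi + 1))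
-- ===== Notes on version B (the rewrite author's own statement) =====
-- stated objective: faster
-- what changed: B computes the window bounds in closed form and emits the two contiguous ranges around t directly, replacing A's conditional-append loop followed by a sort.
import Mathlib
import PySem

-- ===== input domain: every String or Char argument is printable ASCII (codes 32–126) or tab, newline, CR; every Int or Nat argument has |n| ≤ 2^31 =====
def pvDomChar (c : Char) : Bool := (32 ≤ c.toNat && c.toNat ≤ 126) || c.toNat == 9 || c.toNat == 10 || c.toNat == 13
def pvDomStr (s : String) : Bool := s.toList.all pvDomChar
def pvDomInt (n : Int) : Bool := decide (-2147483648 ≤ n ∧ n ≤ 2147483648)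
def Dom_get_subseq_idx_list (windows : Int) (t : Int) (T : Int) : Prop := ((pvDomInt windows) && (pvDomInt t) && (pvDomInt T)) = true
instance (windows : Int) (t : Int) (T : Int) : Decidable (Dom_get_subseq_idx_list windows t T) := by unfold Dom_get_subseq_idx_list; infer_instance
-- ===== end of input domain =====

-- B replaces A's append-and-sort loop by emitting the window as two contiguous ranges around t directly, with no sort.

-- ===== PORT A =====
-- loop body of A: append t-u if nonnegative, then t+u if within the sequence
def pvStepA (t : Int) (T : Int) (acc : List Int) (u : Int) : List Int :=
  let acc2 := if 0 ≤ t - u then acc ++ [t - u] else acc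
  if t + u ≤ T - 1 then acc2 ++ [t + u] else acc2

def get_subseq_idx_list (windows : Int) (t : Int) (T : Int) : List Int :=
  let index_list :=
    (PySem.List.pyRange 1 (PySem.Int.floordiv windows 2 + 1) 1).foldl (pvStepA t T) []
  PySem.List.sorted (index_list ++ [t]) (fun x => x) false

-- ===== PORT B =====
def get_subseq_idx_list_alt (windows : Int) (t : Int) (T : Int) : List Int :=
  let w := PySem.Int.floordiv windows 2
  let lo := max (t - w) 0
  let hi := min (t + w) (T - 1)
  PySem.List.pyRange lo t 1 ++ [t] ++ PySem.List.pyRange (t + 1) (hi + 1) 1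

-- ===== PRECONDITION & SPEC =====
def Spec_get_subseq_idx_list (windows : Int) (t : Int) (T : Int) (out : List Int) : Prop := out = get_subseq_idx_list_alt windows t T
instance (windows : Int) (t : Int) (T : Int) (out : List Int) : Decidable (Spec_get_subseq_idx_list windows t T out) := by unfold Spec_get_subseq_idx_list; infer_instance

-- ===== CLAIM (what is proved, stated in full; the proofs are below) =====
def Claim_equal_get_subseq_idx_list : Prop := ∀ (windows : Int) (t : Int) (T : Int), Dom_get_subseq_idx_list windows t T → Spec_get_subseq_idx_list windows t T (get_subseq_idx_list windows t T)

-- ===== LEMMAS AND PROOFS =====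

theorem pv_perm_left {acc Lh Rh : List Int} {x : Int} (h : acc.Perm (Lh ++ Rh)) :
    (acc ++ [x]).Perm ((x :: Lh) ++ Rh) :=
  (List.perm_append_singleton x acc).trans (h.cons x)

theorem pv_perm_right {acc Lh Rh : List Int} {y : Int} (h : acc.Perm (Lh ++ Rh)) :
    (acc ++ [y]).Perm (Lh ++ (Rh ++ [y])) := by
  have h2 : (acc ++ [y]).Perm ((Lh ++ Rh) ++ [y]) := h.append_right [y]
  rwa [List.append_assoc] at h2

-- A's loop over u = 1..n builds a permutation of left range ++ right range.
theorem pv_loop_perm (t T : Int) (n : Nat) :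
    ((PySem.List.pyRange 1 ((n : Int) + 1) 1).foldl (pvStepA t T) []).Perm
      (PySem.List.pyRange (max (t - (n : Int)) 0) t 1 ++
       PySem.List.pyRange (t + 1) (min (t + (n : Int)) (T - 1) + 1) 1) := by
  induction n with
  | zero =>
      simp only [Nat.cast_zero, sub_zero, add_zero, zero_add]
      rw [PySem.List.pyRange_one_eq_nil (le_refl 1),
          PySem.List.pyRange_one_eq_nil (le_max_left t 0),
          PySem.List.pyRange_one_eq_nil (by omega : min t (T - 1) + 1 ≤ t + 1)]
      simp
  | succ n ih =>
      rw [show ((n + 1 : Nat) : Int) + 1 = ((n : Int) + 1) + 1 by push_cast; ring,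
          PySem.List.pyRange_one_succ_right (by omega), List.foldl_append]
      simp only [List.foldl_cons, List.foldl_nil, Nat.cast_add, Nat.cast_one]
      unfold pvStepA
      by_cases hl : 0 ≤ t - ((n : Int) + 1)
      all_goals by_cases hr : t + ((n : Int) + 1) ≤ T - 1
      · -- both appended
        rw [if_pos hl, if_pos hr]
        have e1 : PySem.List.pyRange (max (t - ((n : Int) + 1)) 0) t 1
            = (t - ((n : Int) + 1)) :: PySem.List.pyRange (max (t - (n : Int)) 0) t 1 := by
          rw [show max (t - ((n : Int) + 1)) 0 = t - ((n : Int) + 1) by omega,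
              PySem.List.pyRange_one_cons (by omega)]
          congr 2
          omega
        have e2 : PySem.List.pyRange (t + 1) (min (t + ((n : Int) + 1)) (T - 1) + 1) 1
            = PySem.List.pyRange (t + 1) (min (t + (n : Int)) (T - 1) + 1) 1 ++ [t + ((n : Int) + 1)] := by
          rw [show min (t + ((n : Int) + 1)) (T - 1) = t + ((n : Int) + 1) by omega,
              PySem.List.pyRange_one_succ_right (by omega)]
          congr 2
          omega
        rw [e1, e2]
        exact pv_perm_right (pv_perm_left ih)
      · -- only left appended
        rw [if_pos hl, if_neg hr]
        have e1 : PySem.List.pyRange (max (t - ((n : Int) + 1)) 0) t 1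
            = (t - ((n : Int) + 1)) :: PySem.List.pyRange (max (t - (n : Int)) 0) t 1 := by
          rw [show max (t - ((n : Int) + 1)) 0 = t - ((n : Int) + 1) by omega,
              PySem.List.pyRange_one_cons (by omega)]
          congr 2
          omega
        rw [e1, show min (t + ((n : Int) + 1)) (T - 1) = min (t + (n : Int)) (T - 1) by omega]
        exact pv_perm_left ih
      · -- only right appended
        rw [if_neg hl, if_pos hr]
        have e2 : PySem.List.pyRange (t + 1) (min (t + ((n : Int) + 1)) (T - 1) + 1) 1
            = PySem.List.pyRange (t + 1) (min (t + (n : Int)) (T - 1) + 1) 1 ++ [t + ((n : Int) + 1)] := by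
          rw [show min (t + ((n : Int) + 1)) (T - 1) = t + ((n : Int) + 1) by omega,
              PySem.List.pyRange_one_succ_right (by omega)]
          congr 2
          omega
        rw [e2, show max (t - ((n : Int) + 1)) 0 = max (t - (n : Int)) 0 by omega]
        exact pv_perm_right ih
      · -- neither appended
        rw [if_neg hl, if_neg hr,
            show max (t - ((n : Int) + 1)) 0 = max (t - (n : Int)) 0 by omega,
            show min (t + ((n : Int) + 1)) (T - 1) = min (t + (n : Int)) (T - 1) by omega]
        exact ih

-- B's output is strictly increasing.
theorem pv_alt_pairwise (lo t hi : Int) :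
    (PySem.List.pyRange lo t 1 ++ [t] ++ PySem.List.pyRange (t + 1) (hi + 1) 1).Pairwise (· < ·) := by
  rw [List.append_assoc, List.pairwise_append]
  refine ⟨PySem.List.pairwise_lt_pyRange_one _ _, ?_, ?_⟩
  · rw [List.singleton_append, List.pairwise_cons]
    constructor
    · intro y hy
      have := (PySem.List.mem_pyRange_one).1 hy
      omega
    · exact PySem.List.pairwise_lt_pyRange_one _ _
  · intro x hx y hy
    have hx' := (PySem.List.mem_pyRange_one).1 hx
    rcases List.mem_cons.1 hy with h | h
    · omega
    · have := (PySem.List.mem_pyRange_one).1 h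
      omega

-- ===== VERDICT (by name: the statement is the Claim_ definition above) =====
theorem get_subseq_idx_list_spec : Claim_equal_get_subseq_idx_list := by
  intro windows t T _
  unfold Spec_get_subseq_idx_list get_subseq_idx_list get_subseq_idx_list_alt
  set w := PySem.Int.floordiv windows 2 with hw
  by_cases hwn : w + 1 ≤ 1
  · -- empty loop
    rw [PySem.List.pyRange_one_eq_nil hwn]
    simp only [List.foldl_nil, List.nil_append]
    rw [PySem.List.pyRange_one_eq_nil (by omega : t ≤ max (t - w) 0),
        PySem.List.pyRange_one_eq_nil (by omega : min (t + w) (T - 1) + 1 ≤ t + 1)]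
    simp only [List.nil_append, List.append_nil]
    apply PySem.List.sorted_eq_self_of_pairwise
    exact List.pairwise_singleton _ _
  · -- loop runs w times, w ≥ 1
    have hw0 : 0 ≤ w := by omega
    have hcast : ((w.toNat : Int)) = w := Int.toNat_of_nonneg hw0
    have hperm := pv_loop_perm t T w.toNat
    rw [hcast] at hperm
    apply PySem.List.sorted_eq_of_perm_of_pairwise_lt
    · -- (Lh ++ [t] ++ Rh).Perm (loop ++ [t])
      have p1 := pv_perm_left (x := t) hperm
      have p2 : ((PySem.List.pyRange (max (t - w) 0) t 1 ++ [t]) ++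
          PySem.List.pyRange (t + 1) (min (t + w) (T - 1) + 1) 1).Perm
          ((t :: PySem.List.pyRange (max (t - w) 0) t 1) ++
          PySem.List.pyRange (t + 1) (min (t + w) (T - 1) + 1) 1) :=
        List.Perm.append_right _ (List.perm_append_singleton t _)
      exact p2.trans p1.symm
    · exact pv_alt_pairwise (max (t - w) 0) t (min (t + w) (T - 1))
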